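-- pv_equiv track=rewrite | github.com/caroline-kranefuss/caroline-kranefuss | python/hash_tables/bijective_pattern_mapping.py | chaining_function
-- ===== SOURCE A (Python) =====
-- def chaining_function(arr):
--     """
--     A hash function to assign values in an array
--     """
--     # Make an array the length of the  input array to serve as the hash table
--     chaining = [[] for _ in range (0,len(arr))]
--     # Start by filling the first empty bucket
--     chaining[0].append(arr[0])
--     # Then, for every item in the array starting at the 2nd item and going to the last
--     for i in range(1,len(arr)):
--         # Track if the item is placed
--         placed = False
--         # For every array in chaining
--         for j in range(0,len(chaining)):
--             # As long as the array is not empty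
--             if chaining[j]:
--             # If the item in question equals an element already in chaining (including the first)
--                 if arr[i] == chaining[j][0]:
--                     # Put the ith element in that bucket of chaining
--                     chaining[j].append(arr[i])
--                     placed = True
--                     break
--         # If not placed in an existing chain, put into the next empty bucket
--         if not placed:
--             for j in range(len(chaining)):
--                 if not chaining[j]:
--                     chaining[j].append(arr[i])
--                     break
--     return chaining
-- ===== SOURCE B (Python) =====
-- def chaining_function(arr):
--     # One pass: group equal values into dict buckets keyed by value (first-occurrence order),
--     # then pad with empty buckets up to len(arr).
--     buckets = {}
--     for x in arr:
--         buckets.setdefault(x, []).append(x)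
--     result = list(buckets.values())
--     result.extend([] for _ in range(len(arr) - len(result)))
--     return result
-- ===== Notes on version B (the rewrite author's own statement) =====
-- stated objective: faster
-- what changed: Replaced the quadratic rescan of all buckets for every element by a single pass that groups equal values in a dict keyed by value (first-occurrence order) and then pads with empty buckets up to len(arr).
import Mathlib
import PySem

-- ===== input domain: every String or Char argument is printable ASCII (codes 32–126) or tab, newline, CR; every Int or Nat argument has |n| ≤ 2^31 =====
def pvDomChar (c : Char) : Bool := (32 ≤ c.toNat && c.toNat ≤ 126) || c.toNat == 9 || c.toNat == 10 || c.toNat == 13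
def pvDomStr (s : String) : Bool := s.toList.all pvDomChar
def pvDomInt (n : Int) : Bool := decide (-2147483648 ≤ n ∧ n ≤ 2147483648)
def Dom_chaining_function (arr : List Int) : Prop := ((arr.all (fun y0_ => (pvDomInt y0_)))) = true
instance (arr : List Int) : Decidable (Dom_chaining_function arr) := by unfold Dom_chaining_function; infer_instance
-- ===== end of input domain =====

-- B groups equal elements in one pass with a dict keyed by value (objective: faster, O(n^2) → O(n)).
-- ===== PORT A =====
-- inner loop 'for j: if chaining[j]: if arr[i] == chaining[j][0]: append; break'
def aFindMatch : List (List Int) → Int → Nat → Option Nat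
  | [], _, _ => none
  | b :: rest, x, j =>
    match b with
    | [] => aFindMatch rest x (j + 1)
    | h :: _ => if x = h then some j else aFindMatch rest x (j + 1)

-- second inner loop 'for j: if not chaining[j]: append; break'
def aFindEmpty : List (List Int) → Nat → Option Nat
  | [], _ => none
  | b :: rest, j => if b = [] then some j else aFindEmpty rest (j + 1)

-- chaining[j].append(x)
def aAppendAt (ch : List (List Int)) (j : Nat) (x : Int) : List (List Int) :=
  ch.set j ((ch.getD j []) ++ [x])

-- body of the outer 'for i in range(1, len(arr))' loop
def aStep (ch : List (List Int)) (x : Int) : List (List Int) :=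
  match aFindMatch ch x 0 with
  | some j => aAppendAt ch j x
  | none =>
    match aFindEmpty ch 0 with
    | some j => aAppendAt ch j x
    | none => ch

def chaining_function (arr : List Int) : List (List Int) :=
  let chaining := arr.map (fun _ => ([] : List Int))
  -- chaining[0].append(arr[0]); raises IndexError on [] (excluded by Pre_)
  let chaining := aAppendAt chaining 0 (PySem.List.pyGetD arr 0 0)
  (PySem.List.pyRange 1 arr.length 1).foldl
    (fun ch i => aStep ch (PySem.List.pyGetD arr i 0)) chaining

-- ===== PORT B =====
def chaining_function_alt (arr : List Int) : List (List Int) :=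
  let buckets := arr.foldl
    (fun (d : PySem.Dict Int (List Int)) x => d.modify x [] (· ++ [x])) PySem.Dict.empty
  let result := buckets.values
  result ++ List.replicate (arr.length - result.length) []

-- ===== PRECONDITION & SPEC =====
-- Pre_ excludes only the empty list, on which A raises IndexError (chaining[0]).
def Pre_chaining_function (arr : List Int) : Prop := arr ≠ []
instance (arr : List Int) : Decidable (Pre_chaining_function arr) := by
  unfold Pre_chaining_function; infer_instance
def pvWitness_chaining_function : List Int := [2, 1, 2]

def Spec_chaining_function (arr : List Int) (out : List (List Int)) : Prop :=
  out = chaining_function_alt arr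
instance (arr : List Int) (out : List (List Int)) : Decidable (Spec_chaining_function arr out) := by
  unfold Spec_chaining_function; infer_instance

-- ===== CLAIM (what is proved, stated in full; the proofs are below) =====
def Claim_equal_chaining_function : Prop :=
  ∀ (arr : List Int), Dom_chaining_function arr → Pre_chaining_function arr →
    Spec_chaining_function arr (chaining_function arr)

-- ===== LEMMAS AND PROOFS =====

-- the bucket of value v after processing prefix p
def grp (p : List Int) (v : Int) : List Int := p.filter (fun y => y == v)

-- the whole table after processing prefix p, with m trailing empty buckets
def tbl (p : List Int) (m : Nat) : List (List Int) :=
  (PySem.Set.ofList p).map (grp p) ++ List.replicate m []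

lemma grp_cons_of_mem {p : List Int} {v : Int} (h : v ∈ p) :
    ∃ t, grp p v = v :: t := by
  induction p with
  | nil => cases h
  | cons a p ih =>
    by_cases hav : a = v
    · exact ⟨grp p v, by simp [grp, hav]⟩
    · rcases ih ((List.mem_cons.mp h).resolve_left (fun e => hav e.symm)) with ⟨t, ht⟩
      exact ⟨t, by simpa [grp, hav] using ht⟩

lemma grp_ne_nil_of_mem {p : List Int} {v : Int} (h : v ∈ p) : grp p v ≠ [] := by
  rcases grp_cons_of_mem h with ⟨t, ht⟩; simp [ht]

lemma grp_nil_of_not_mem {p : List Int} {v : Int} (h : v ∉ p) : grp p v = [] := by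
  simp only [grp, List.filter_eq_nil_iff]
  intro y hy hyv
  exact h ((by simpa using hyv : y = v) ▸ hy)

lemma grp_append_self {p : List Int} {x : Int} : grp (p ++ [x]) x = grp p x ++ [x] := by
  simp [grp]

lemma grp_append_ne {p : List Int} {x v : Int} (h : v ≠ x) : grp (p ++ [x]) v = grp p v := by
  have hxv : (x == v) = false := beq_eq_false_iff_ne.mpr (Ne.symm h)
  simp [grp, List.filter_append, hxv]

lemma aAppendAt_cons_succ (b : List Int) (ch : List (List Int)) (j : Nat) (x : Int) :
    aAppendAt (b :: ch) (j + 1) x = b :: aAppendAt ch j x := by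
  simp [aAppendAt]

lemma aAppendAt_cons_zero (b : List Int) (ch : List (List Int)) (x : Int) :
    aAppendAt (b :: ch) 0 x = (b ++ [x]) :: ch := by
  simp [aAppendAt]

lemma aFindMatch_shift (ch : List (List Int)) (x : Int) (j : Nat) :
    aFindMatch ch x j = (aFindMatch ch x 0).map (fun k => j + k) := by
  induction ch generalizing j with
  | nil => rfl
  | cons b rest ih =>
    cases b with
    | nil =>
      simp only [aFindMatch]
      rw [ih (j + 1), ih 1, Option.map_map]
      congr 1; funext k; simp; omega
    | cons h t =>
      by_cases hx : x = h
      · simp [aFindMatch, hx]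
      · simp only [aFindMatch, if_neg hx]
        rw [ih (j + 1), ih 1, Option.map_map]
        congr 1; funext k; simp; omega

lemma aFindEmpty_shift (ch : List (List Int)) (j : Nat) :
    aFindEmpty ch j = (aFindEmpty ch 0).map (fun k => j + k) := by
  induction ch generalizing j with
  | nil => rfl
  | cons b rest ih =>
    by_cases hb : b = []
    · simp [aFindEmpty, hb]
    · simp only [aFindEmpty, if_neg hb]
      rw [ih (j + 1), ih 1, Option.map_map]
      congr 1; funext k; simp; omega

lemma aFindMatch_all_nil {tail : List (List Int)} (h : ∀ b ∈ tail, b = []) (x : Int) (j : Nat) :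
    aFindMatch tail x j = none := by
  induction tail generalizing j with
  | nil => rfl
  | cons b rest ih =>
    have hb : b = [] := h b (by simp)
    subst hb
    simp only [aFindMatch]
    exact ih (fun b hb => h b (by simp [hb])) (j + 1)

lemma aFindMatch_none (ds : List Int) (p : List Int) (x : Int) (tail : List (List Int))
    (hmem : ∀ v ∈ ds, v ∈ p) (htail : ∀ b ∈ tail, b = []) (hx : ∀ v ∈ ds, x ≠ v) (j : Nat) :
    aFindMatch (ds.map (grp p) ++ tail) x j = none := by
  induction ds generalizing j with
  | nil => simpa using aFindMatch_all_nil htail x j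
  | cons v ds ih =>
    rcases grp_cons_of_mem (hmem v (by simp)) with ⟨t, ht⟩
    simp only [List.map_cons, List.cons_append, ht, aFindMatch, if_neg (hx v (by simp))]
    exact ih (fun w hw => hmem w (by simp [hw])) (fun w hw => hx w (by simp [hw])) (j + 1)

lemma find_append_mem (ds : List Int) (p : List Int) (x : Int) (tail : List (List Int))
    (hnd : ds.Nodup) (hmem : ∀ v ∈ ds, v ∈ p) (hx : x ∈ ds) :
    ∃ j, aFindMatch (ds.map (grp p) ++ tail) x 0 = some j ∧
      aAppendAt (ds.map (grp p) ++ tail) j x = ds.map (grp (p ++ [x])) ++ tail := by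
  induction ds with
  | nil => cases hx
  | cons v ds ih =>
    rcases grp_cons_of_mem (hmem v (by simp)) with ⟨t, ht⟩
    by_cases hxv : x = v
    · refine ⟨0, ?_, ?_⟩
      · simp [List.map_cons, ht, aFindMatch, hxv]
      · rw [List.map_cons, List.cons_append, aAppendAt_cons_zero]
        subst hxv
        have hds : ∀ w ∈ ds, grp (p ++ [x]) w = grp p w := fun w hw =>
          grp_append_ne (fun hwx => (List.nodup_cons.mp hnd).1 (hwx ▸ hw))
        rw [List.map_cons, List.cons_append, grp_append_self, List.map_congr_left hds]
    · have hxds : x ∈ ds := (List.mem_cons.mp hx).resolve_left hxv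
      rcases ih (List.nodup_cons.mp hnd).2 (fun w hw => hmem w (by simp [hw])) hxds
        with ⟨j, hfind, happ⟩
      refine ⟨j + 1, ?_, ?_⟩
      · simp only [List.map_cons, List.cons_append, ht, aFindMatch, if_neg hxv]
        rw [aFindMatch_shift, hfind]
        simp [Nat.add_comm]
      · rw [List.map_cons, List.cons_append, aAppendAt_cons_succ, happ,
          List.map_cons, List.cons_append, grp_append_ne (fun hvx => hxv hvx.symm)]

lemma aFindEmpty_at (gs : List (List Int)) (rest : List (List Int))
    (hgs : ∀ b ∈ gs, b ≠ []) :
    aFindEmpty (gs ++ [] :: rest) 0 = some gs.length := by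
  induction gs with
  | nil => simp [aFindEmpty]
  | cons b gs ih =>
    simp only [List.cons_append, aFindEmpty, if_neg (hgs b (by simp))]
    rw [aFindEmpty_shift, ih (fun w hw => hgs w (by simp [hw]))]
    simp [Nat.add_comm]

lemma aAppendAt_at_length (gs : List (List Int)) (rest : List (List Int)) (x : Int) :
    aAppendAt (gs ++ [] :: rest) gs.length x = gs ++ [x] :: rest := by
  induction gs with
  | nil => simp [aAppendAt]
  | cons b gs ih => simpa [aAppendAt_cons_succ] using ih

lemma aStep_tbl_mem (p : List Int) (x : Int) (m : Nat) (hx : x ∈ p) :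
    aStep (tbl p m) x = tbl (p ++ [x]) m := by
  rcases find_append_mem (PySem.Set.ofList p) p x (List.replicate m [])
    (PySem.Set.nodup_ofList p) (fun v hv => (PySem.Set.mem_ofList _ _).mp hv)
    ((PySem.Set.mem_ofList _ _).mpr hx) with ⟨j, hfind, happ⟩
  unfold aStep tbl
  rw [hfind]
  dsimp only
  rw [happ, PySem.Set.ofList_append_singleton,
    PySem.Set.add_of_mem ((PySem.Set.mem_ofList _ _).mpr hx)]

lemma aStep_tbl_not_mem (p : List Int) (x : Int) (m : Nat) (hx : x ∉ p) :
    aStep (tbl p (m + 1)) x = tbl (p ++ [x]) m := by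
  have hmem : ∀ v ∈ PySem.Set.ofList p, v ∈ p := fun v hv => (PySem.Set.mem_ofList _ _).mp hv
  have hnone : aFindMatch ((PySem.Set.ofList p).map (grp p) ++ List.replicate (m + 1) []) x 0
      = none :=
    aFindMatch_none _ p x _ hmem (fun b hb => List.eq_of_mem_replicate hb)
      (fun v hv hxv => hx (hxv ▸ hmem v hv)) 0
  unfold aStep tbl
  rw [hnone]
  dsimp only
  simp only [List.replicate_succ]
  rw [aFindEmpty_at _ _ (fun b hb => by
    rcases List.mem_map.mp hb with ⟨v, hv, hbv⟩
    exact hbv ▸ grp_ne_nil_of_mem (hmem v hv))]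
  dsimp only
  rw [aAppendAt_at_length]
  rw [PySem.Set.ofList_append_singleton,
    PySem.Set.add_of_not_mem (fun hc => hx ((PySem.Set.mem_ofList _ _).mp hc)),
    List.map_append, List.map_congr_left
      (fun v hv => grp_append_ne (fun hvx => hx (by rw [← hvx]; exact hmem v hv))),
    List.map_singleton, grp_append_self, grp_nil_of_not_mem hx]
  simp

lemma loop_tbl (q p : List Int) :
    q.foldl aStep (tbl p (p.length + q.length - (PySem.Set.ofList p).length))
      = tbl (p ++ q) ((p ++ q).length - (PySem.Set.ofList (p ++ q)).length) := by
  induction q generalizing p with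
  | nil => simp
  | cons x q ih =>
    simp only [List.foldl_cons]
    have hle : (PySem.Set.ofList p).length ≤ p.length := PySem.Set.length_ofList_le p
    by_cases hx : x ∈ p
    · have hds : PySem.Set.ofList (p ++ [x]) = PySem.Set.ofList p := by
        rw [PySem.Set.ofList_append_singleton,
          PySem.Set.add_of_mem ((PySem.Set.mem_ofList _ _).mpr hx)]
      have hM : p.length + (x :: q).length - (PySem.Set.ofList p).length
          = (p ++ [x]).length + q.length - (PySem.Set.ofList (p ++ [x])).length := by
        rw [hds]; simp; omega
      rw [hM, aStep_tbl_mem _ _ _ hx, ih (p ++ [x])]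
      simp
    · have hds : PySem.Set.ofList (p ++ [x]) = PySem.Set.ofList p ++ [x] := by
        rw [PySem.Set.ofList_append_singleton,
          PySem.Set.add_of_not_mem (fun hc => hx ((PySem.Set.mem_ofList _ _).mp hc))]
      have hM : p.length + (x :: q).length - (PySem.Set.ofList p).length
          = ((p ++ [x]).length + q.length - (PySem.Set.ofList (p ++ [x])).length) + 1 := by
        rw [hds]; simp; omega
      rw [hM, aStep_tbl_not_mem _ _ _ hx, ih (p ++ [x])]
      simp

-- A computes tbl
lemma chaining_eq_tbl (a : Int) (rest : List Int) :
    chaining_function (a :: rest)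
      = tbl (a :: rest) ((a :: rest).length - (PySem.Set.ofList (a :: rest)).length) := by
  unfold chaining_function
  simp only [PySem.List.pyGetD_zero_cons, List.map_cons, aAppendAt_cons_zero, List.nil_append]
  rw [PySem.List.foldl_pyRange_pyGetD' (a :: rest) 0 aStep
    ([a] :: List.map (fun _ => ([] : List Int)) rest) (by norm_num : (0 : Int) ≤ 1)]
  have h1 : PySem.Set.ofList [a] = [a] := by
    apply PySem.Set.ofList_eq_self_of_nodup
    exact List.nodup_singleton a
  have hinit : ([a] :: List.map (fun _ => ([] : List Int)) rest) = tbl [a] rest.length := by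
    simp [tbl, h1, grp, List.map_const']
  have hloop := loop_tbl rest [a]
  rw [h1] at hloop
  simp only [List.singleton_append, List.length_cons, List.length_nil] at hloop ⊢
  have harith : 0 + 1 + rest.length - (0 + 1) = rest.length := by omega
  rw [harith] at hloop
  simp only [Int.toNat_one, List.drop_succ_cons, List.drop_zero]
  rw [hinit]
  exact hloop

-- B computes tbl
lemma alt_eq_tbl (arr : List Int) :
    chaining_function_alt arr = tbl arr (arr.length - (PySem.Set.ofList arr).length) := by
  simp only [chaining_function_alt]
  have hkeys : (arr.foldl
      (fun (d : PySem.Dict Int (List Int)) x => d.modify x [] (· ++ [x]))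
      PySem.Dict.empty).keys = PySem.Set.ofList arr := by
    rw [PySem.Dict.keys_foldl_modify arr [] (fun _ x => (· ++ [x])) PySem.Dict.empty]
    rw [PySem.Dict.keys_empty, PySem.Set.update_nil_left]
  have hd : ∀ c, (arr.foldl
      (fun (d : PySem.Dict Int (List Int)) x => d.modify x [] (· ++ [x]))
      PySem.Dict.empty).getD c [] = grp arr c := by
    intro c
    rw [← List.foldl_map (f := fun x : Int => (x, x))
      (g := fun (d : PySem.Dict Int (List Int)) p => d.modify p.1 [] (· ++ [p.2]))]
    rw [PySem.Dict.getD_foldl_modify_append]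
    simp [grp, List.filter_map, Function.comp_def, PySem.Dict.getD_empty]
  rw [PySem.Dict.values_eq_map_keys _ (by rw [hkeys]; exact PySem.Set.nodup_ofList arr) []]
  rw [hkeys, List.map_congr_left (fun k _ => hd k), List.length_map]
  rfl

-- ===== VERDICT (by name: the statement is the Claim_ definition above) =====
theorem chaining_function_spec : Claim_equal_chaining_function := by
  intro arr _ hpre
  unfold Spec_chaining_function
  cases arr with
  | nil => exact absurd rfl hpre
  | cons a rest => rw [chaining_eq_tbl, alt_eq_tbl]
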